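-- pv_equiv track=rewrite | github.com/mustafasencer/AlgorithmDataStructureWithGraphviz | problems/array/check_if_array_circular.py | solution
-- ===== SOURCE A (Python) =====
-- from typing import List
--
-- def solution(nums: List[int]) -> bool:
-- 	"""
-- 	1. loop over the array
-- 	2. check if any index has a circular path
-- 	3. is_seen stores the indices that have been seen
-- 	4. if local set has the index stored then the circularity is confirmed
-- 	"""
-- 	is_seen = set()
--
-- 	for i in range(len(nums)):
-- 		local = set()
--
-- 		while True:
-- 			if i in local:
-- 				return True
--
-- 			if i in is_seen:  # means that we have already been this path and it is not circular
-- 				break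
--
-- 			is_seen.add(i)
-- 			local.add(i)
--
-- 			prev = i
-- 			i = (i + nums[i]) % len(
-- 				nums
-- 			)  # Add the value at index i and get the mod of it to find the next i in the path
-- 			if (
-- 				prev == i or (nums[i] > 0) != (nums[prev] > 0)
-- 			):  # if current i ends up in the same i than no path (single item) and both the i and prev values are > 0
-- 				break
--
-- 	return False
-- ===== SOURCE B (Python) =====
-- from typing import List
--
-- def solution(nums: List[int]) -> bool:
-- 	n = len(nums)
--
-- 	def walk_free(j: int, steps: int) -> bool:
-- 		# all `steps` consecutive jumps from j avoid a self-step and keep the sign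
-- 		for _ in range(steps):
-- 			nxt = (j + nums[j]) % n
-- 			if nxt == j or (nums[nxt] > 0) != (nums[j] > 0):
-- 				return False
-- 			j = nxt
-- 		return True
--
-- 	# a walk that survives n jumps must be trapped in a valid cycle (pigeonhole)
-- 	return any(walk_free(i, n) for i in range(n))
-- ===== Notes on version B (the rewrite author's own statement) =====
-- stated objective: simpler
-- what changed: Replaced A's two visited-set bookkeeping (global is_seen memo threaded through an unbounded while-loop plus a per-start local set) by a plain bounded walk: a start is circular iff n consecutive jumps avoid self-steps and sign changes (pigeonhole), so B keeps no sets at all.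
import Mathlib
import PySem

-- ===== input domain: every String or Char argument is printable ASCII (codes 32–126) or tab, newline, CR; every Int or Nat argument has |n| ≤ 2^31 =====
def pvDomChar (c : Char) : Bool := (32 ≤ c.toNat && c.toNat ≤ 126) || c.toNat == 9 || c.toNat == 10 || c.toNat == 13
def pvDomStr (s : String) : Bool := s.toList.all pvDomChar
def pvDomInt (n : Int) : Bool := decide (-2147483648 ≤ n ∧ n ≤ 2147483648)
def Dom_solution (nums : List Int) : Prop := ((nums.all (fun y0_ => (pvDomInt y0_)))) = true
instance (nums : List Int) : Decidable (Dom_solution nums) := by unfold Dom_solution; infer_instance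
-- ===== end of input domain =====

-- B replaces A's two visited-sets bookkeeping by a plain bounded walk: a start is circular
-- iff n consecutive jumps stay self-step-free and sign-consistent (pigeonhole); objective: simpler.

-- ===== PORT A =====
-- termination helpers for A's while-loop (measure: indices of range(n) not yet in `local`)
def freeCnt (n : Nat) (l : List Int) : Nat :=
  ((Finset.range n).filter (fun k : Nat => ((k : Int) ∉ l))).card

theorem freeCnt_le (n : Nat) (l : List Int) (x : Int) :
    freeCnt n (PySem.Set.add l x) ≤ freeCnt n l := by
  apply Finset.card_le_card
  intro k hk
  simp only [Finset.mem_filter, PySem.Set.mem_add] at hk ⊢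
  tauto

theorem freeCnt_lt (n : Nat) (l : List Int) (x : Int)
    (hx : x ∉ l) (h0 : 0 ≤ x) (hn : x < (n : Int)) :
    freeCnt n (PySem.Set.add l x) < freeCnt n l := by
  apply Finset.card_lt_card
  constructor
  · intro k hk
    simp only [Finset.mem_filter, PySem.Set.mem_add] at hk ⊢
    tauto
  · intro hsub
    have hmem : x.toNat ∈ (Finset.range n).filter (fun k : Nat => ((k : Int) ∉ l)) := by
      simp only [Finset.mem_filter, Finset.mem_range]
      constructor
      · omega
      · rwa [Int.toNat_of_nonneg h0]
    have := hsub hmem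
    simp only [Finset.mem_filter, PySem.Set.mem_add, Int.toNat_of_nonneg h0] at this
    tauto

-- the body of A's `while True` loop; returns (returned True?, updated is_seen)
def solutionInner (nums : List Int) (i : Int) (seen loc : PySem.Set Int) :
    Bool × PySem.Set Int :=
  if _h1 : PySem.Set.contains loc i then (true, seen)
  else if _h2 : PySem.Set.contains seen i then (false, seen)
  else
    match hv : PySem.List.pyGet? nums i with
    | none => (false, PySem.Set.add seen i)  -- unreachable: Python would raise IndexError
    | some v =>
      let i2 := PySem.Int.mod (i + v) nums.length
      if i2 == i || (decide (0 < PySem.List.pyGetD nums i2 0) != decide (0 < v)) then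
        (false, PySem.Set.add seen i)
      else
        solutionInner nums i2 (PySem.Set.add seen i) (PySem.Set.add loc i)
termination_by freeCnt nums.length loc * 2 + (if 0 ≤ i ∧ i < (nums.length : Int) then 0 else 1)
decreasing_by
  have hne : 0 < nums.length := by
    have := PySem.List.mem_of_pyGet?_eq_some (h := hv)
    exact List.length_pos_of_mem this
  have hN : (0 : Int) < (nums.length : Int) := by exact_mod_cast hne
  have hi2a : 0 ≤ PySem.Int.mod (i + v) nums.length := PySem.Int.mod_nonneg _ hN
  have hi2b : PySem.Int.mod (i + v) nums.length < (nums.length : Int) := PySem.Int.mod_lt _ hN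
  have hloc : i ∉ loc := by
    intro hmem
    exact _h1 ((PySem.Set.contains_iff _ _).mpr hmem)
  rw [if_pos ⟨hi2a, hi2b⟩]
  by_cases hr : 0 ≤ i ∧ i < (nums.length : Int)
  · have := freeCnt_lt nums.length loc i hloc hr.1 hr.2
    omega
  · rw [if_neg hr]
    have := freeCnt_le nums.length loc i
    omega

-- A's outer `for i in range(len(nums))` loop threading is_seen
def solutionOuter (nums : List Int) (starts : List Int) (seen : PySem.Set Int) : Bool :=
  match starts with
  | [] => false
  | s :: rest =>
    match solutionInner nums s seen PySem.Set.empty with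
    | (true, _) => true
    | (false, seen') => solutionOuter nums rest seen'

def solution (nums : List Int) : Bool :=
  solutionOuter nums (PySem.List.pyRange 0 nums.length 1) PySem.Set.empty

-- ===== PORT B =====
-- Source B's walk_free(j, steps): all `steps` jumps from j avoid a self-step and keep the sign
def walkFree (nums : List Int) (j : Int) : Nat → Bool
  | 0 => true
  | s + 1 =>
    let nxt := PySem.Int.mod (j + PySem.List.pyGetD nums j 0) nums.length
    if nxt == j || (decide (0 < PySem.List.pyGetD nums nxt 0) != decide (0 < PySem.List.pyGetD nums j 0)) then
      false
    else
      walkFree nums nxt s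

def solution_alt (nums : List Int) : Bool :=
  (PySem.List.pyRange 0 nums.length 1).any (fun i => walkFree nums i nums.length)

-- ===== PRECONDITION & SPEC =====
def Spec_solution (nums : List Int) (out : Bool) : Prop := out = solution_alt nums
instance (nums : List Int) (out : Bool) : Decidable (Spec_solution nums out) := by unfold Spec_solution; infer_instance

-- ===== CLAIM (what is proved, stated in full; the proofs are below) =====
def Claim_equal_solution : Prop := ∀ (nums : List Int), Dom_solution nums → Spec_solution nums (solution nums)

-- ===== LEMMAS AND PROOFS =====
-- the jump function and the break test both programs iterate
def pvG (nums : List Int) (j : Int) : Int :=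
  PySem.Int.mod (j + PySem.List.pyGetD nums j 0) nums.length

def pvBrk (nums : List Int) (j : Int) : Bool :=
  (pvG nums j == j) ||
    (decide (0 < PySem.List.pyGetD nums (pvG nums j) 0) != decide (0 < PySem.List.pyGetD nums j 0))

-- the walk from j eventually breaks
def pvBreaks (nums : List Int) (j : Int) : Prop :=
  ∃ m : Nat, pvBrk nums ((pvG nums)^[m] j) = true

theorem pvG_range (nums : List Int) (hpos : 0 < nums.length) (j : Int) :
    0 ≤ pvG nums j ∧ pvG nums j < (nums.length : Int) := by
  have hN : (0 : Int) < (nums.length : Int) := by exact_mod_cast hpos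
  exact ⟨PySem.Int.mod_nonneg _ hN, PySem.Int.mod_lt _ hN⟩

theorem walkFree_iff (nums : List Int) (steps : Nat) (j : Int) :
    walkFree nums j steps = true ↔ ∀ m < steps, pvBrk nums ((pvG nums)^[m] j) = false := by
  induction steps generalizing j with
  | zero => simp [walkFree]
  | succ s ih =>
    rw [walkFree]
    show (if pvBrk nums j = true then false else walkFree nums (pvG nums j) s) = true ↔ _
    cases hb : pvBrk nums j with
    | true =>
      rw [if_pos rfl]
      simp only [Bool.false_eq_true, false_iff]
      intro h
      have := h 0 (Nat.succ_pos s)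
      simp only [Function.iterate_zero, id_eq] at this
      rw [this] at hb; exact Bool.false_ne_true hb
    | false =>
      rw [if_neg (by simp)]
      rw [ih (pvG nums j)]
      constructor
      · intro h m hm
        cases m with
        | zero => simpa using hb
        | succ k =>
          have := h k (by omega)
          rwa [Function.iterate_succ_apply]
      · intro h m hm
        have := h (m + 1) (by omega)
        rwa [Function.iterate_succ_apply] at this

theorem alt_iff (nums : List Int) :
    solution_alt nums = true ↔
      ∃ i : Int, 0 ≤ i ∧ i < (nums.length : Int) ∧
        ∀ m < nums.length, pvBrk nums ((pvG nums)^[m] i) = false := by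
  unfold solution_alt
  rw [List.any_eq_true]
  constructor
  · rintro ⟨i, hi, hw⟩
    rw [PySem.List.mem_pyRange_one] at hi
    exact ⟨i, hi.1, hi.2, (walkFree_iff nums nums.length i).mp hw⟩
  · rintro ⟨i, h0, hn, hf⟩
    exact ⟨i, (PySem.List.mem_pyRange_one).mpr ⟨h0, hn⟩,
      (walkFree_iff nums nums.length i).mpr hf⟩

-- pigeonhole: a walk that is break-free for n steps is break-free forever
theorem pigeonhole (nums : List Int) (hpos : 0 < nums.length) (i : Int)
    (h0 : 0 ≤ i) (hn : i < (nums.length : Int))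
    (hfree : ∀ m < nums.length, pvBrk nums ((pvG nums)^[m] i) = false) :
    ∀ m : Nat, pvBrk nums ((pvG nums)^[m] i) = false := by
  have hrange : ∀ m : Nat, 0 ≤ (pvG nums)^[m] i ∧ (pvG nums)^[m] i < (nums.length : Int) := by
    intro m
    induction m with
    | zero => exact ⟨h0, hn⟩
    | succ k ihk => rw [Function.iterate_succ_apply']; exact pvG_range nums hpos _
  have key : ∀ p q : Nat, p < q → q ≤ nums.length → (pvG nums)^[q] i = (pvG nums)^[p] i →
      ∀ m : Nat, pvBrk nums ((pvG nums)^[m] i) = false := by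
    intro p q hpq hqn hcyc m
    induction m using Nat.strong_induction_on with
    | _ m ih =>
      by_cases hm : m < nums.length
      · exact hfree m hm
      · have hstep : (pvG nums)^[m] i = (pvG nums)^[m - q + p] i := by
          have hm' : m = (m - q) + q := by omega
          conv_lhs => rw [hm']
          rw [Function.iterate_add_apply, hcyc, ← Function.iterate_add_apply]
        rw [hstep]
        exact ih (m - q + p) (by omega)
  obtain ⟨a, b, hab, hfeq⟩ := Fintype.exists_ne_map_eq_of_card_lt
    (f := fun k : Fin (nums.length + 1) =>
      (⟨((pvG nums)^[k.1] i).toNat, by have := hrange k.1; omega⟩ : Fin nums.length))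
    (by simp)
  have hval : ((pvG nums)^[a.1] i).toNat = ((pvG nums)^[b.1] i).toNat := by
    simpa using congrArg Fin.val hfeq
  have heq : (pvG nums)^[a.1] i = (pvG nums)^[b.1] i := by
    have ha := hrange a.1
    have hb := hrange b.1
    omega
  rcases Nat.lt_trichotomy a.1 b.1 with h | h | h
  · exact key a.1 b.1 h (by omega) heq.symm
  · exact absurd (Fin.ext h) hab
  · exact key b.1 a.1 h (by omega) heq

-- a break-free return to i makes the walk from i break-free forever
theorem cycle_infinite (nums : List Int) (i : Int) (m : Nat) (hm : 1 ≤ m)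
    (hcy : (pvG nums)^[m] i = i) (hfr : ∀ k < m, pvBrk nums ((pvG nums)^[k] i) = false) :
    ∀ t : Nat, pvBrk nums ((pvG nums)^[t] i) = false := by
  intro t
  induction t using Nat.strong_induction_on with
  | _ t ih =>
    by_cases hlt : t < m
    · exact hfr t hlt
    · have h1 : (pvG nums)^[t] i = (pvG nums)^[t - m] i := by
        have ht : t = (t - m) + m := by omega
        conv_lhs => rw [ht]
        rw [Function.iterate_add_apply, hcy]
      rw [h1]
      exact ih (t - m) (by omega)

-- the inner-loop invariant lemma
theorem breaks_of_reach (nums : List Int) (j i : Int) (m : Nat)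
    (hcy : (pvG nums)^[m] j = i) (hb : pvBreaks nums i) : pvBreaks nums j := by
  obtain ⟨t, ht⟩ := hb
  exact ⟨t + m, by rw [Function.iterate_add_apply, hcy]; exact ht⟩

theorem pyGetD_eq_of_some (xs : List Int) (i v : Int)
    (h : PySem.List.pyGet? xs i = some v) : PySem.List.pyGetD xs i 0 = v := by
  simp [PySem.List.pyGetD, h]

theorem inner_spec (nums : List Int) (i : Int) (seen loc : PySem.Set Int) :
    0 ≤ i → i < (nums.length : Int) →
    (∀ j ∈ seen, pvBreaks nums j ∨ j ∈ loc) →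
    (∀ j ∈ loc, (0 ≤ j ∧ j < (nums.length : Int)) ∧
      ∃ m : Nat, 1 ≤ m ∧ (pvG nums)^[m] j = i ∧ ∀ k < m, pvBrk nums ((pvG nums)^[k] j) = false) →
    (((solutionInner nums i seen loc).1 = true →
      ∃ i0 : Int, 0 ≤ i0 ∧ i0 < (nums.length : Int) ∧
        ∀ m : Nat, pvBrk nums ((pvG nums)^[m] i0) = false) ∧
    ((solutionInner nums i seen loc).1 = false →
      (∀ j ∈ (solutionInner nums i seen loc).2, pvBreaks nums j) ∧ pvBreaks nums i)) := by
  induction i, seen, loc using solutionInner.induct (nums := nums) with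
  | case1 i seen loc h1 =>
    intro h0 hn hseen hloc
    have hres : solutionInner nums i seen loc = (true, seen) := by
      rw [solutionInner, dif_pos h1]
    have hi : i ∈ loc := (PySem.Set.contains_iff _ _).mp h1
    obtain ⟨⟨hj0, hjn⟩, m, hm1, hcy, hfr⟩ := hloc i hi
    rw [hres]
    constructor
    · intro _
      exact ⟨i, hj0, hjn, cycle_infinite nums i m hm1 hcy hfr⟩
    · intro hk; exact absurd hk (by simp)
  | case2 i seen loc h1 h2 =>
    intro h0 hn hseen hloc
    have hres : solutionInner nums i seen loc = (false, seen) := by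
      rw [solutionInner, dif_neg h1, dif_pos h2]
    have hi : i ∈ seen := (PySem.Set.contains_iff _ _).mp h2
    have hbrk : pvBreaks nums i := by
      rcases hseen i hi with hb | hl
      · exact hb
      · exact absurd ((PySem.Set.contains_iff _ _).mpr hl) h1
    rw [hres]
    refine ⟨fun hk => absurd hk (by simp), fun _ => ⟨?_, hbrk⟩⟩
    intro j hj
    rcases hseen j hj with hb | hl
    · exact hb
    · obtain ⟨_, m, _, hcy, _⟩ := hloc j hl
      exact breaks_of_reach nums j i m hcy hbrk
  | case3 i seen loc h1 h2 h3 =>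
    intro h0 hn hseen hloc
    exfalso
    have := (PySem.List.pyGet?_eq_none_iff (xs := nums) (i := i)).mp h3
    apply this
    simp only [PySem.Raise.InRange]
    omega
  | case4 i seen loc h1 h2 v h3 i2 h4 =>
    intro h0 hn hseen hloc
    have hv' : PySem.List.pyGetD nums i 0 = v := pyGetD_eq_of_some nums i v h3
    have hbrk : pvBrk nums i = true := by
      unfold pvBrk pvG
      rw [hv']
      exact h4
    have hres : solutionInner nums i seen loc = (false, PySem.Set.add seen i) := by
      rw [solutionInner, dif_neg h1, dif_neg h2]
      split
      · next heq => rw [h3] at heq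
      · next w heq =>
        rw [h3] at heq
        have hw : v = w := by injection heq
        subst hw
        rw [if_pos h4]
    have hBi : pvBreaks nums i := ⟨0, by simpa using hbrk⟩
    rw [hres]
    refine ⟨fun hk => absurd hk (by simp), fun _ => ⟨?_, hBi⟩⟩
    intro j hj
    rcases (PySem.Set.mem_add _ _ _).mp hj with hjs | hje
    · rcases hseen j hjs with hb | hl
      · exact hb
      · obtain ⟨_, m, _, hcy, _⟩ := hloc j hl
        exact breaks_of_reach nums j i m hcy hBi
    · subst hje; exact hBi
  | case5 i seen loc h1 h2 v h3 i2 h5 ih =>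
    intro h0 hn hseen hloc
    rw [Bool.not_eq_true] at h5
    have hv' : PySem.List.pyGetD nums i 0 = v := pyGetD_eq_of_some nums i v h3
    have hpos : 0 < nums.length := by
      have := PySem.List.mem_of_pyGet?_eq_some (h := h3)
      exact List.length_pos_of_mem this
    have hN : (0 : Int) < (nums.length : Int) := by exact_mod_cast hpos
    have hgi : pvG nums i = PySem.Int.mod (i + v) nums.length := by
      unfold pvG; rw [hv']
    have hbrkF : pvBrk nums i = false := by
      unfold pvBrk
      rw [hgi, hv']
      exact h5
    have h0' : 0 ≤ PySem.Int.mod (i + v) nums.length := PySem.Int.mod_nonneg _ hN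
    have hn' : PySem.Int.mod (i + v) nums.length < (nums.length : Int) := PySem.Int.mod_lt _ hN
    have hres : solutionInner nums i seen loc =
        solutionInner nums (PySem.Int.mod (i + v) nums.length)
          (PySem.Set.add seen i) (PySem.Set.add loc i) := by
      rw [solutionInner, dif_neg h1, dif_neg h2]
      split
      · next heq => rw [h3] at heq; exact absurd heq (by simp)
      · next w heq =>
        rw [h3] at heq
        have hw : v = w := by injection heq
        subst hw
        rw [if_neg (by rw [h5]; simp)]
    have hseen' : ∀ j ∈ PySem.Set.add seen i,
        pvBreaks nums j ∨ j ∈ PySem.Set.add loc i := by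
      intro j hj
      rcases (PySem.Set.mem_add _ _ _).mp hj with hjs | hje
      · rcases hseen j hjs with hb | hl
        · exact Or.inl hb
        · exact Or.inr ((PySem.Set.mem_add _ _ _).mpr (Or.inl hl))
      · exact Or.inr ((PySem.Set.mem_add _ _ _).mpr (Or.inr hje))
    have hloc' : ∀ j ∈ PySem.Set.add loc i,
        (0 ≤ j ∧ j < (nums.length : Int)) ∧
        ∃ m : Nat, 1 ≤ m ∧ (pvG nums)^[m] j = PySem.Int.mod (i + v) nums.length ∧
          ∀ k < m, pvBrk nums ((pvG nums)^[k] j) = false := by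
      intro j hj
      rcases (PySem.Set.mem_add _ _ _).mp hj with hjl | hje
      · obtain ⟨hr, m, hm1, hcy, hfr⟩ := hloc j hjl
        refine ⟨hr, m + 1, by omega, ?_, ?_⟩
        · rw [Function.iterate_succ_apply', hcy, hgi]
        · intro k hk
          rcases Nat.lt_or_ge k m with hkm | hkm
          · exact hfr k hkm
          · have hkm' : k = m := by omega
            subst hkm'
            rw [hcy]
            exact hbrkF
      · subst hje
        refine ⟨⟨h0, hn⟩, 1, le_refl 1, ?_, ?_⟩
        · simp only [Function.iterate_one]; exact hgi
        · intro k hk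
          have : k = 0 := by omega
          subst this
          simpa using hbrkF
    have hIH := ih h0' hn' hseen' hloc'
    rw [hres]
    refine ⟨hIH.1, fun hf => ?_⟩
    obtain ⟨hgood, hb2⟩ := hIH.2 hf
    refine ⟨hgood, ?_⟩
    exact breaks_of_reach nums i _ 1 (by simpa using hgi) hb2

theorem outer_spec (nums : List Int) (starts : List Int) (seen : PySem.Set Int)
    (hseen : ∀ j ∈ seen, pvBreaks nums j)
    (hst : ∀ s ∈ starts, 0 ≤ s ∧ s < (nums.length : Int)) :
    (solutionOuter nums starts seen = true →
      ∃ i0 : Int, 0 ≤ i0 ∧ i0 < (nums.length : Int) ∧ ∀ m : Nat, pvBrk nums ((pvG nums)^[m] i0) = false) ∧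
    (solutionOuter nums starts seen = false → ∀ s ∈ starts, pvBreaks nums s) := by
  induction starts generalizing seen with
  | nil =>
    refine ⟨fun h => absurd h (by simp [solutionOuter]), fun _ => ?_⟩
    intro s hs; exact absurd hs (by simp)
  | cons s rest ih =>
    have hs := hst s (by simp)
    have hinner := inner_spec nums s seen PySem.Set.empty hs.1 hs.2
      (fun j hj => Or.inl (hseen j hj))
      (fun j hj => absurd hj (by simp [PySem.Set.empty]))
    rcases hres : solutionInner nums s seen PySem.Set.empty with ⟨b, seen'⟩
    rw [hres] at hinner
    have hout : solutionOuter nums (s :: rest) seen =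
        match (b, seen') with
        | (true, _) => true
        | (false, seen') => solutionOuter nums rest seen' := by
      rw [solutionOuter, hres]
    cases b with
    | true =>
      simp only at hout
      rw [hout]
      exact ⟨fun _ => hinner.1 rfl, fun hk => absurd hk (by simp)⟩
    | false =>
      simp only at hout
      rw [hout]
      obtain ⟨hgood, hbs⟩ := hinner.2 rfl
      have hihr := ih seen' hgood (fun t ht => hst t (by simp [ht]))
      refine ⟨hihr.1, fun hf => ?_⟩
      intro t ht
      rcases List.mem_cons.mp ht with hte | htr
      · subst hte; exact hbs
      · exact hihr.2 hf t htr

-- ===== VERDICT (by name: the statement is the Claim_ definition above) =====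
theorem solution_spec : Claim_equal_solution := by
  intro nums _
  show solution nums = solution_alt nums
  by_cases hpos : 0 < nums.length
  · have houter := outer_spec nums (PySem.List.pyRange 0 nums.length 1) PySem.Set.empty
      (fun j hj => absurd hj (by simp [PySem.Set.empty]))
      (fun t ht => by
        rw [PySem.List.mem_pyRange_one] at ht
        exact ht)
    rw [Bool.eq_iff_iff]
    constructor
    · intro hA
      obtain ⟨i0, h0, hn, hinf⟩ := houter.1 hA
      exact (alt_iff nums).mpr ⟨i0, h0, hn, fun m _ => hinf m⟩
    · intro hB
      obtain ⟨i, h0, hn, hfree⟩ := (alt_iff nums).mp hB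
      have hinf := pigeonhole nums hpos i h0 hn hfree
      cases hsol : solution nums with
      | true => rfl
      | false =>
        exfalso
        have hall := houter.2 hsol i ((PySem.List.mem_pyRange_one).mpr ⟨h0, hn⟩)
        obtain ⟨t, ht⟩ := hall
        rw [hinf t] at ht
        exact Bool.false_ne_true ht
  · have hnil : nums = [] := by
      cases nums with
      | nil => rfl
      | cons x xs => simp at hpos
    subst hnil
    decide
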